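-- pv_equiv track=rewrite | github.com/HumanCircles/lead_mailer | clean_inboxes.py | _row_to_record
-- ===== SOURCE A (Python) =====
-- FIELDNAMES = ["inbox", "from", "subject", "date", "body"]
--
-- def _row_to_record(cells: list[str]) -> dict[str, str] | None:
--     """Map a csv.reader row to FIELDNAMES; handles ragged rows."""
--     if not cells or not any((c or "").strip() for c in cells):
--         return None
--     row = list(cells)
--     if len(row) < len(FIELDNAMES):
--         row.extend([""] * (len(FIELDNAMES) - len(row)))
--     elif len(row) > len(FIELDNAMES):
--         row = row[:4] + [",".join(row[4:])]
--     return dict(zip(FIELDNAMES, row, strict=True))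
-- ===== SOURCE B (Python) =====
-- FIELDNAMES = ["inbox", "from", "subject", "date", "body"]
--
-- def _row_to_record(cells: list[str]) -> dict[str, str] | None:
--     """Map a csv.reader row to FIELDNAMES; handles ragged rows."""
--     if not any((c or "").strip() for c in cells):
--         return None
--
--     def go(names, vals):
--         # structural recursion over the schema: the last fieldname absorbs
--         # the whole remaining tail (joined), every earlier one takes vals[0] or "".
--         if len(names) == 1:
--             return {names[0]: ",".join(vals)}
--         out = {names[0]: vals[0] if vals else ""}
--         out.update(go(names[1:], vals[1:]))
--         return out
--
--     return go(FIELDNAMES, cells)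
-- ===== Notes on version B (the rewrite author's own statement) =====
-- stated objective: alternative
-- what changed: A normalises the row (pad with '' or truncate-and-join the tail) and zips it with FIELDNAMES; B never builds a normalised row: a structural recursion descends the schema and the cells in lockstep, the last fieldname absorbing the joined remaining tail and each earlier one taking the head cell or ''.
import Mathlib
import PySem

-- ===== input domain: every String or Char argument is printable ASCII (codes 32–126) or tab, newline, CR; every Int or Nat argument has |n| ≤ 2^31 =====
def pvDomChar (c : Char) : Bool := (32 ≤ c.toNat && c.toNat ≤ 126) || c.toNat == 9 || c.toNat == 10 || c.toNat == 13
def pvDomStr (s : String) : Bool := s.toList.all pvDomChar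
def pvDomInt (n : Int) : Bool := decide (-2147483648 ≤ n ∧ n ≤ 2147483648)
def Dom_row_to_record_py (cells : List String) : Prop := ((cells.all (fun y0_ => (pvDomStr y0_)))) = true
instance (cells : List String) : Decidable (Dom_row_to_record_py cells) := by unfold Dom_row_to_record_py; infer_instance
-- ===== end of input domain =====

-- B replaces A's pad/truncate-then-zip with a structural recursion descending schema and cells in lockstep (alternative; same cost).


-- ===== PORT A =====
def FIELDNAMES : List String := ["inbox", "from", "subject", "date", "body"]

-- literal port of A: emptiness/all-blank guard, then pad or truncate-and-join, then zip with FIELDNAMES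
def row_to_record_py (cells : List String) : Option (List (String × String)) :=
  if cells = [] ∨ ¬ cells.any (fun c => PySem.Str.strip c ≠ "") then
    none
  else
    let row := cells
    let row :=
      if row.length < FIELDNAMES.length then
        row ++ List.replicate (FIELDNAMES.length - row.length) ""
      else if row.length > FIELDNAMES.length then
        row.take 4 ++ [PySem.Str.join "," (row.drop 4)]
      else row
    some (FIELDNAMES.zip row)

-- ===== PORT B =====
-- literal port of B's helper `go`: structural recursion over the schema; the last
-- fieldname takes the joined remaining tail, earlier ones take vals[0] or "".
-- (the Python dict-update appends the recursive result after the head binding,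
-- exact here because FIELDNAMES has distinct names)
def row_to_record_go : List String → List String → List (String × String)
  | [], _ => []
  | [n], vals => [(n, PySem.Str.join "," vals)]
  | n :: n' :: ns, vals => (n, vals.headD "") :: row_to_record_go (n' :: ns) vals.tail

def row_to_record_py_alt (cells : List String) : Option (List (String × String)) :=
  if cells.any (fun c => PySem.Str.strip c ≠ "") then
    some (row_to_record_go FIELDNAMES cells)
  else none

-- ===== PRECONDITION & SPEC =====
def Spec_row_to_record_py (cells : List String) (out : Option (List (String × String))) : Prop := out = row_to_record_py_alt cells
instance (cells : List String) (out : Option (List (String × String))) : Decidable (Spec_row_to_record_py cells out) := by unfold Spec_row_to_record_py; infer_instance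

-- ===== CLAIM (what is proved, stated in full; the proofs are below) =====
def Claim_equal_row_to_record_py : Prop := ∀ (cells : List String), Dom_row_to_record_py cells → Spec_row_to_record_py cells (row_to_record_py cells)

-- ===== LEMMAS AND PROOFS =====
theorem str_join_nil : PySem.Str.join "," ([] : List String) = "" := rfl
theorem str_join_singleton (e : String) : PySem.Str.join "," [e] = e := by
  simp [PySem.Str.join, PySem.Chars.join_singleton]

-- ===== VERDICT (by name: the statement is the Claim_ definition above) =====
theorem row_to_record_py_spec : Claim_equal_row_to_record_py := by
  intro cells _
  unfold Spec_row_to_record_py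
  match cells with
  | [] => simp [row_to_record_py, row_to_record_py_alt]
  | [a] =>
      by_cases h : [a].any (fun c => PySem.Str.strip c ≠ "") <;>
        simp_all [row_to_record_py, row_to_record_py_alt, row_to_record_go, str_join_nil, FIELDNAMES]
  | [a, b] =>
      by_cases h : [a, b].any (fun c => PySem.Str.strip c ≠ "") <;>
        simp_all [row_to_record_py, row_to_record_py_alt, row_to_record_go, str_join_nil, FIELDNAMES]
  | [a, b, c] =>
      by_cases h : [a, b, c].any (fun c => PySem.Str.strip c ≠ "") <;>
        simp_all [row_to_record_py, row_to_record_py_alt, row_to_record_go, str_join_nil, FIELDNAMES]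
  | [a, b, c, d] =>
      by_cases h : [a, b, c, d].any (fun c => PySem.Str.strip c ≠ "") <;>
        simp_all [row_to_record_py, row_to_record_py_alt, row_to_record_go, str_join_nil, FIELDNAMES]
  | [a, b, c, d, e] =>
      by_cases h : [a, b, c, d, e].any (fun c => PySem.Str.strip c ≠ "") <;>
        simp_all [row_to_record_py, row_to_record_py_alt, row_to_record_go, str_join_singleton, FIELDNAMES]
  | a :: b :: c :: d :: e :: f :: rest =>
      by_cases h : (a :: b :: c :: d :: e :: f :: rest).any (fun x => PySem.Str.strip x ≠ "") <;>
        simp_all [row_to_record_py, row_to_record_py_alt, row_to_record_go, FIELDNAMES,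
          show ¬ (rest.length + 1 + 1 + 1 + 1 + 1 + 1 < 5) from by omega]
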